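-- pv_equiv track=rewrite | github.com/mocmeo/algorithms | expressive-words.py | checkWords
-- ===== SOURCE A (Python) =====
-- def checkWords(s, word):
-- 	i = 0
-- 	j = 0
-- 	while i < len(s) and j < len(word):
-- 		if s[i] == word[j]:
-- 			ch = s[i]
-- 			cntS = 0
-- 			cntWord = 0
-- 			while i < len(s) and s[i] == ch:
-- 				i += 1
-- 				cntS += 1
-- 			while j < len(word) and word[j] == ch:
-- 				j += 1
-- 				cntWord += 1
-- 			if (cntS < 3 and cntS != cntWord) or (cntS < cntWord):
-- 				return 0
-- 		else:
-- 			return 0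
--
-- 	if i == len(s) and j == len(word):
-- 		return 1
-- 	else:
-- 		return 0
-- ===== SOURCE B (Python) =====
-- def checkWords(s, word):
--     def rle(t):
--         groups = []
--         i = 0
--         while i < len(t):
--             j = i
--             while j < len(t) and t[j] == t[i]:
--                 j += 1
--             groups.append((t[i], j - i))
--             i = j
--         return groups
--
--     gs = rle(s)
--     gw = rle(word)
--     if len(gs) != len(gw):
--         return 0
--     for (cS, nS), (cW, nW) in zip(gs, gw):
--         if cS != cW or (nS < 3 and nS != nW) or nS < nW:
--             return 0
--     return 1
-- ===== Notes on version B (the rewrite author's own statement) =====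
-- stated objective: idiomatic
-- what changed: Replaces the interleaved two-pointer scan over both strings with a compress-then-compare decomposition: run-length-encode each string once, then compare the two group lists length-wise and pairwise.
import Mathlib
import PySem

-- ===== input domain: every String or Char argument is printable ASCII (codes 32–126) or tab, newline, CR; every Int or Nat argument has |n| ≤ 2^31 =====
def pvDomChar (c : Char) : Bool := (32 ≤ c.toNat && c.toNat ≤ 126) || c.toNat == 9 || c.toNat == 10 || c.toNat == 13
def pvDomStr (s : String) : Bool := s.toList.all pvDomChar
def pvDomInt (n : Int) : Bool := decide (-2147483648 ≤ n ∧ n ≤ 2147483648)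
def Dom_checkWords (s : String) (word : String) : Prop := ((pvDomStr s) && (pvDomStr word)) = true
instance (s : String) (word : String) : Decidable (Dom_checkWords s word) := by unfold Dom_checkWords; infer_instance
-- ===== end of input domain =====

-- B replaces A's interleaved two-pointer scan with run-length-encode both strings, then compare group lists (idiomatic decomposition; same cost).

-- shared helper: count the leading run of character c and return (count, rest);
-- this is A's inner "while t[k] == ch: k += 1" scan (and Source B's identical inner while in rle)
def pvRun (c : Char) : List Char → Nat × List Char
  | [] => (0, [])
  | x :: xs => if x = c then ((pvRun c xs).1 + 1, (pvRun c xs).2) else (0, x :: xs)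

theorem pvRun_len (c : Char) : ∀ xs : List Char, (pvRun c xs).2.length ≤ xs.length := by
  intro xs
  induction xs with
  | nil => simp [pvRun]
  | cons x xs ih =>
    simp only [pvRun]
    split
    · exact Nat.le_succ_of_le ih
    · simp

-- ===== PORT A =====
-- A's outer while over (i, j) becomes structural recursion over the two suffixes
def pvGoA : List Char → List Char → Int
  | [], [] => 1
  | [], _ :: _ => 0
  | _ :: _, [] => 0
  | a :: as, b :: bs =>
    if a = b then
      -- cntS / cntWord: the two inner while loops consuming the run of ch = a
      let pS := pvRun a (a :: as)
      let pW := pvRun a (b :: bs)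
      if (pS.1 < 3 ∧ pS.1 ≠ pW.1) ∨ pS.1 < pW.1 then 0
      else pvGoA pS.2 pW.2
    else 0
termination_by ls _ => ls.length
decreasing_by
  simp only [pvRun]
  exact Nat.lt_succ_of_le (pvRun_len a as)

def checkWords (s : String) (word : String) : Int := pvGoA s.toList word.toList

-- ===== PORT B =====
-- Source B's rle: consume one run at a time, recording (char, run length)
def pvRle : List Char → List (Char × Nat)
  | [] => []
  | a :: as => (a, (pvRun a as).1 + 1) :: pvRle (pvRun a as).2
termination_by ls => ls.length
decreasing_by
  exact Nat.lt_succ_of_le (pvRun_len a as)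

-- Source B's zip loop condition (negated: the pair is OK)
def pvPairOk (p : (Char × Nat) × (Char × Nat)) : Bool :=
  decide (p.1.1 = p.2.1 ∧ ¬((p.1.2 < 3 ∧ p.1.2 ≠ p.2.2) ∨ p.1.2 < p.2.2))

def checkWords_alt (s : String) (word : String) : Int :=
  let gs := pvRle s.toList
  let gw := pvRle word.toList
  if gs.length ≠ gw.length then 0
  else if (gs.zip gw).all pvPairOk then 1 else 0

-- ===== PRECONDITION & SPEC =====
def Spec_checkWords (s : String) (word : String) (out : Int) : Prop := out = checkWords_alt s word
instance (s : String) (word : String) (out : Int) : Decidable (Spec_checkWords s word out) := by unfold Spec_checkWords; infer_instance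

-- ===== CLAIM (what is proved, stated in full; the proofs are below) =====
def Claim_equal_checkWords : Prop := ∀ (s : String) (word : String), Dom_checkWords s word → Spec_checkWords s word (checkWords s word)

-- ===== LEMMAS AND PROOFS =====

-- recursive comparison of two group lists (proof-side reformulation of B's length check + zip loop)
def pvCmp : List (Char × Nat) → List (Char × Nat) → Int
  | [], [] => 1
  | [], _ :: _ => 0
  | _ :: _, [] => 0
  | g :: gs, h :: hs =>
    if g.1 = h.1 ∧ ¬((g.2 < 3 ∧ g.2 ≠ h.2) ∨ g.2 < h.2) then pvCmp gs hs else 0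

theorem pvCmp_eq (gs : List (Char × Nat)) : ∀ hs,
    pvCmp gs hs =
      (if gs.length ≠ hs.length then 0
       else if (gs.zip hs).all pvPairOk then (1 : Int) else 0) := by
  induction gs with
  | nil => intro hs; cases hs <;> simp [pvCmp]
  | cons g gs ih =>
    intro hs
    cases hs with
    | nil => simp [pvCmp]
    | cons h hs =>
      simp only [pvCmp, List.zip_cons_cons, List.all_cons, List.length_cons, ih hs, pvPairOk,
        Bool.and_eq_true, decide_eq_true_eq]
      split_ifs <;> first | rfl | tauto | omega

theorem pvGoA_eq_pvCmp : ∀ n ls lw, ls.length ≤ n → pvGoA ls lw = pvCmp (pvRle ls) (pvRle lw) := by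
  intro n
  induction n with
  | zero =>
    intro ls lw h
    have : ls = [] := List.eq_nil_of_length_eq_zero (Nat.le_zero.mp h)
    subst this
    cases lw <;> simp [pvGoA, pvRle, pvCmp]
  | succ n ih =>
    intro ls lw h
    cases ls with
    | nil => cases lw <;> simp [pvGoA, pvRle, pvCmp]
    | cons a as =>
      cases lw with
      | nil => simp [pvGoA, pvRle, pvCmp]
      | cons b bs =>
        by_cases hab : a = b
        · subst hab
          have hrunS : pvRun a (a :: as) = ((pvRun a as).1 + 1, (pvRun a as).2) := by
            simp [pvRun]
          have hrunW : pvRun a (a :: bs) = ((pvRun a bs).1 + 1, (pvRun a bs).2) := by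
            simp [pvRun]
          have hlen : (pvRun a as).2.length ≤ n :=
            le_trans (pvRun_len a as) (Nat.lt_succ_iff.mp (Nat.lt_of_lt_of_le (Nat.lt_succ_of_le (Nat.le_refl _)) h))
          simp only [pvGoA, hrunS, hrunW, pvRle, pvCmp]
          split_ifs <;> first | rfl | exact ih _ _ hlen | tauto
        · simp [pvGoA, hab, pvRle, pvCmp]

-- ===== VERDICT (by name: the statement is the Claim_ definition above) =====
theorem checkWords_spec : Claim_equal_checkWords := by
  intro s word _
  unfold Spec_checkWords checkWords checkWords_alt
  rw [pvGoA_eq_pvCmp s.toList.length s.toList word.toList (Nat.le_refl _), pvCmp_eq]
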